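-- pv_equiv track=rewrite | github.com/PedroAchcar/modified-nodal-analysis-circuits | trab1pedroachcar.py | limpaCodigo
-- ===== SOURCE A (Python) =====
-- def limpaCodigo(netlist: list):
--     '''Função que limpa o arquivo da netlist, removendo linhas em branco e comentários
--     Entrada->netlist "suja"
--     Saída->netlist "limpa"'''
--     # Colocar na lista count quais sao os indices que precisam ser removidos
--     count = []
--     for i in range(len(netlist)):
--         if netlist[i] == '\n' or netlist[i].startswith('*'):
--             count.append(i)
--     count.sort(reverse=True)
--
--     # Remove os indices da netlist, teve que ser de tras para frente pois, ao remover
--     # um indice, o que precisava ser removido tinha mudado de posicao na lista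
--     for i in count:
--         netlist.pop(i)
--     return netlist
-- ===== SOURCE B (Python) =====
-- def limpaCodigo(netlist: list):
--     '''Single-pass in-place compaction with a write cursor instead of
--     collecting indices, reverse-sorting them and popping one by one.'''
--     w = 0
--     for i in range(len(netlist)):
--         line = netlist[i]
--         if not (line == '\n' or line.startswith('*')):
--             netlist[w] = line
--             w += 1
--     del netlist[w:]
--     return netlist
-- ===== Notes on version B (the rewrite author's own statement) =====
-- stated objective: alternative
-- what changed: Replaced A's collect-indices / reverse-sort / pop-each-index removal with a single in-place two-pointer compaction pass (write cursor) followed by one truncation; measured cost is comparable.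
import Mathlib
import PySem

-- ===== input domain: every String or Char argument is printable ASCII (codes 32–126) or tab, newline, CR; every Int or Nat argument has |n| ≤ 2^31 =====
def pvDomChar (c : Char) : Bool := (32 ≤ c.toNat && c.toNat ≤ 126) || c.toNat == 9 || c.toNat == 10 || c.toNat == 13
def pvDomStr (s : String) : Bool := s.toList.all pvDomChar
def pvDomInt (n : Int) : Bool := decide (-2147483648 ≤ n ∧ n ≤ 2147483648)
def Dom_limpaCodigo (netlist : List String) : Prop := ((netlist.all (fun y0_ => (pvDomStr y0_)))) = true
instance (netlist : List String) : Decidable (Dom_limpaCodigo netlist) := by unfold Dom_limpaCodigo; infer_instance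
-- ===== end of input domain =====

-- B replaces A's collect-indices / reverse-sort / pop-loop removal with one in-place
-- two-pointer compaction pass; equivalence is proved for the returned value (both
-- Pythons also mutate netlist, ending in the same final state).


-- ===== PORT A =====
-- netlist.pop(i): total form of PySem.List.pop?; in A the popped indices are always
-- in range (collected from range(len) and popped back-to-front), so the 'none'
-- (IndexError) branch never fires.
def pvPopStep (l : List String) (i : Int) : List String :=
  ((PySem.List.pop? l i).map Prod.snd).getD l

def limpaCodigo (netlist : List String) : List String :=
  let count : List Int :=
    (PySem.List.pyRange 0 netlist.length 1).foldl
      (fun count i =>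
        if (PySem.List.pyGetD netlist i "" == "\n")
            || PySem.Str.startswith (PySem.List.pyGetD netlist i "") "*"
        then count ++ [i] else count) []
  let count := PySem.List.sorted count (fun x => x) true
  count.foldl pvPopStep netlist

-- ===== PORT B =====
def limpaCodigo_alt (netlist : List String) : List String :=
  let r : List String × Int :=
    (PySem.List.pyRange 0 netlist.length 1).foldl
      (fun (st : List String × Int) i =>
        let line := PySem.List.pyGetD st.1 i ""
        if !(line == "\n" || PySem.Str.startswith line "*")
        then (PySem.List.pySetD st.1 st.2 line, st.2 + 1)
        else st)
      (netlist, 0)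
  -- del netlist[w:] keeps netlist[:w]
  PySem.List.slice r.1 none (some r.2)

-- ===== PRECONDITION & SPEC =====
def Spec_limpaCodigo (netlist : List String) (out : List String) : Prop := out = limpaCodigo_alt netlist
instance (netlist : List String) (out : List String) : Decidable (Spec_limpaCodigo netlist out) := by unfold Spec_limpaCodigo; infer_instance

-- ===== CLAIM (what is proved, stated in full; the proofs are below) =====
def Claim_equal_limpaCodigo : Prop := ∀ (netlist : List String), Dom_limpaCodigo netlist → Spec_limpaCodigo netlist (limpaCodigo netlist)

-- ===== LEMMAS AND PROOFS =====

/-- The removal test both Pythons apply to a line. -/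
def pvBad (s : String) : Bool := (s == "\n") || PySem.Str.startswith s "*"

/-- Indices (counted from start `s`) of the lines A marks for removal. -/
def pvBadIdx : List String → Int → List Int
  | [], _ => []
  | x :: t, s => if pvBad x then s :: pvBadIdx t (s + 1) else pvBadIdx t (s + 1)

theorem pvBadIdx_nonneg (l : List String) (s i : Int) (h : i ∈ pvBadIdx l s) : s ≤ i := by
  induction l generalizing s with
  | nil => simp [pvBadIdx] at h
  | cons x t ih =>
    simp only [pvBadIdx] at h
    split at h
    · rcases List.mem_cons.1 h with h | h
      · omega
      · have := ih (s + 1) h; omega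
    · have := ih (s + 1) h; omega

theorem pvBadIdx_pairwise (l : List String) (s : Int) : (pvBadIdx l s).Pairwise (· < ·) := by
  induction l generalizing s with
  | nil => simp [pvBadIdx]
  | cons x t ih =>
    simp only [pvBadIdx]
    split
    · exact List.Pairwise.cons (fun i hi => by have := pvBadIdx_nonneg t (s + 1) i hi; omega) (ih (s + 1))
    · exact ih (s + 1)

theorem pvBadIdx_shift (l : List String) (s : Int) :
    pvBadIdx l (s + 1) = (pvBadIdx l s).map (· + 1) := by
  induction l generalizing s with
  | nil => simp [pvBadIdx]
  | cons x t ih =>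
    simp only [pvBadIdx]
    split <;> simp [ih]

/-- A's first loop: the collected `count` is exactly the bad indices, in increasing order. -/
theorem pvCount_gen (rest : List String) : ∀ (pre : List String) (acc : List Int),
    (PySem.List.pyRange (pre.length) ((pre.length : Int) + rest.length) 1).foldl
      (fun c i => if pvBad (PySem.List.pyGetD (pre ++ rest) i "") then c ++ [i] else c) acc
    = acc ++ pvBadIdx rest (pre.length) := by
  induction rest with
  | nil =>
    intro pre acc
    rw [PySem.List.pyRange_one_eq_nil (by simp)]
    simp [pvBadIdx]
  | cons x rs ih =>
    intro pre acc
    rw [PySem.List.pyRange_one_cons (by simp)]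
    simp only [List.foldl_cons]
    have hget : PySem.List.pyGetD (pre ++ x :: rs) (pre.length) "" = x := by
      rw [PySem.List.pyGetD_natCast]
      simp [List.getD]
    rw [hget]
    have harr : pre ++ x :: rs = (pre ++ [x]) ++ rs := by simp
    have hlen : (pre.length : Int) + 1 = ((pre ++ [x]).length : Int) := by simp
    have hlen2 : (pre.length : Int) + (x :: rs).length = ((pre ++ [x]).length : Int) + rs.length := by
      simp; omega
    rw [hlen, hlen2, harr]
    by_cases hb : pvBad x
    · rw [if_pos hb, ih (pre ++ [x]) (acc ++ [(pre.length : Int)])]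
      simp [pvBadIdx, hb]
    · rw [if_neg hb, ih (pre ++ [x]) acc]
      simp [pvBadIdx, hb]

/-- A's `count.sort(reverse=True)` on the strictly increasing index list reverses it. -/
theorem pvSorted_rev (netlist : List String) :
    PySem.List.sorted (pvBadIdx netlist 0) (fun x => x) true = (pvBadIdx netlist 0).reverse := by
  apply PySem.List.sorted_rev_eq_of_perm_of_pairwise_gt
  · exact List.reverse_perm _
  · exact (List.pairwise_reverse).2 (pvBadIdx_pairwise netlist 0)

theorem pvPopStep_succ (x : String) (l : List String) (i : Int) (hi : 0 ≤ i) :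
    pvPopStep (x :: l) (i + 1) = x :: pvPopStep l i := by
  by_cases h : i < l.length
  · obtain ⟨n, rfl⟩ : ∃ n : Nat, i = ↑n := ⟨i.toNat, (Int.toNat_of_nonneg hi).symm⟩
    have hn : n < l.length := by exact_mod_cast h
    have h1 : ((n : Int) + 1) = ((n + 1 : Nat) : Int) := by push_cast; ring
    rw [h1]
    rw [pvPopStep, pvPopStep, PySem.List.pop?_natCast l n hn,
        PySem.List.pop?_natCast (x :: l) (n + 1) (by simpa using hn)]
    simp [List.eraseIdx_cons_succ]
  · have h1 : PySem.List.pyIdx? l.length i = none := by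
      unfold PySem.List.pyIdx?
      rw [if_pos hi, if_neg h]
    have h2 : PySem.List.pyIdx? (l.length + 1) (i + 1) = none := by
      unfold PySem.List.pyIdx?
      rw [if_pos (by omega), if_neg (by push_cast; omega)]
    simp [pvPopStep, PySem.List.pop?, h1, h2]

theorem pvPopAll_shift (ds : List Int) (h : ∀ i ∈ ds, 0 ≤ i) (x : String) (l : List String) :
    (ds.map (· + 1)).foldl pvPopStep (x :: l) = x :: ds.foldl pvPopStep l := by
  induction ds generalizing l with
  | nil => rfl
  | cons d t ih =>
    simp only [List.map_cons, List.foldl_cons]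
    rw [pvPopStep_succ x l d (h d (by simp))]
    exact ih (fun i hi => h i (by simp [hi])) _

/-- A's second loop: popping the bad indices back-to-front filters the list. -/
theorem pvPopAll (l : List String) :
    (pvBadIdx l 0).reverse.foldl pvPopStep l = l.filter (fun s => !pvBad s) := by
  induction l with
  | nil => rfl
  | cons x t ih =>
    have hshift : pvBadIdx t 1 = (pvBadIdx t 0).map (· + 1) := by
      have := pvBadIdx_shift t 0; simpa using this
    have hnn : ∀ i ∈ (pvBadIdx t 0).reverse, 0 ≤ i := by
      intro i hi
      exact pvBadIdx_nonneg t 0 i (List.mem_reverse.1 hi)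
    by_cases hb : pvBad x
    · simp only [pvBadIdx, hb, if_pos, List.reverse_cons, hshift, zero_add]
      rw [List.foldl_append, ← List.map_reverse, pvPopAll_shift _ hnn, ih]
      simp [pvPopStep, PySem.List.pop?_zero_cons, hb]
    · simp only [pvBadIdx, hb, if_neg, Bool.not_eq_true, zero_add, hshift]
      rw [← List.map_reverse, pvPopAll_shift _ hnn, ih]
      simp [hb]

theorem pvA_eq_filter (netlist : List String) :
    limpaCodigo netlist = netlist.filter (fun s => !pvBad s) := by
  show (PySem.List.sorted
      ((PySem.List.pyRange 0 netlist.length 1).foldl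
        (fun c i =>
          if (PySem.List.pyGetD netlist i "" == "\n")
              || PySem.Str.startswith (PySem.List.pyGetD netlist i "") "*"
          then c ++ [i] else c) [])
      (fun x => x) true).foldl pvPopStep netlist = _
  have hc' : (PySem.List.pyRange 0 netlist.length 1).foldl
      (fun c i =>
        if (PySem.List.pyGetD netlist i "" == "\n")
            || PySem.Str.startswith (PySem.List.pyGetD netlist i "") "*"
        then c ++ [i] else c) [] = pvBadIdx netlist 0 := by
    have hc := pvCount_gen netlist [] []
    simp only [List.length_nil, List.nil_append, Nat.cast_zero, zero_add] at hc
    exact hc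
  rw [hc', pvSorted_rev, pvPopAll]

/-- B's state step, named for the invariant proof. -/
def pvStepB (st : List String × Int) (i : Int) : List String × Int :=
  let line := PySem.List.pyGetD st.1 i ""
  if !(line == "\n" || PySem.Str.startswith line "*")
  then (PySem.List.pySetD st.1 st.2 line, st.2 + 1)
  else st

/-- B's loop invariant: the list is `kept-prefix ++ junk ++ unread-suffix`, the
cursor sits at the end of the kept prefix, and slicing at the final cursor yields
the kept prefix plus the filtered suffix. -/
theorem pvBinv (rest : List String) : ∀ (F junk : List String),
    (fun r : List String × Int => PySem.List.slice r.1 none (some r.2))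
      ((PySem.List.pyRange ((F.length + junk.length : Nat)) ((F.length + junk.length + rest.length : Nat)) 1).foldl
        pvStepB (F ++ junk ++ rest, (F.length : Int)))
    = F ++ rest.filter (fun s => !pvBad s) := by
  induction rest with
  | nil =>
    intro F junk
    rw [PySem.List.pyRange_one_eq_nil (by simp)]
    simp only [List.foldl_nil, List.filter_nil, List.append_nil]
    rw [PySem.List.slice_to_natCast]
    simp
  | cons x rs ih =>
    intro F junk
    rw [PySem.List.pyRange_one_cons (by simp)]
    simp only [List.foldl_cons]
    have hget : PySem.List.pyGetD (F ++ junk ++ x :: rs) ((F.length + junk.length : Nat)) "" = x := by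
      rw [PySem.List.pyGetD_natCast]
      have : F ++ junk ++ x :: rs = (F ++ junk) ++ x :: rs := by simp
      rw [this, List.getD]
      simp
    have hstep : pvStepB (F ++ junk ++ x :: rs, (F.length : Int)) ((F.length + junk.length : Nat)) =
        if !pvBad x
        then (((F ++ [x]) ++ ((junk.drop 1) ++ if junk = [] then [] else [x]) ++ rs : List String), ((F ++ [x]).length : Int))
        else ((F ++ (junk ++ [x]) ++ rs : List String), (F.length : Int)) := by
      rw [pvStepB]
      simp only [hget]
      cases hb : ((x == "\n") || PySem.Str.startswith x "*") with
      | true =>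
        simp only [pvBad, hb, Bool.not_true, Bool.false_eq_true, if_false]
        simp [List.append_assoc]
      | false =>
        simp only [pvBad, hb, Bool.not_false, if_pos]
        rw [PySem.List.pySetD_natCast]
        cases junk with
        | nil =>
          simp
        | cons j js =>
          refine Prod.ext ?_ (by simp)
          simp only []
          have h1 : F ++ j :: js ++ x :: rs = F ++ (j :: (js ++ x :: rs)) := by simp
          rw [h1, List.set_append, if_neg (by omega)]
          simp
    rw [hstep]
    by_cases hb : pvBad x
    · rw [if_neg (by simp [hb])]
      have e1 : ((F.length + junk.length : Nat) : Int) + 1 = ((F.length + (junk ++ [x]).length : Nat) : Int) := by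
        simp; omega
      have e2 : ((F.length + junk.length + (x :: rs).length : Nat) : Int)
          = ((F.length + (junk ++ [x]).length + rs.length : Nat) : Int) := by
        simp; omega
      rw [e1, e2]
      have h := ih F (junk ++ [x])
      simpa [hb] using h
    · rw [if_pos (by simp [hb])]
      have hjl : ((junk.drop 1) ++ if junk = [] then [] else [x]).length = junk.length := by
        cases junk <;> simp
      have e1 : ((F.length + junk.length : Nat) : Int) + 1
          = (((F ++ [x]).length + ((junk.drop 1) ++ if junk = [] then [] else [x]).length : Nat) : Int) := by
        rw [hjl]; simp; omega
      have e2 : ((F.length + junk.length + (x :: rs).length : Nat) : Int)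
          = (((F ++ [x]).length + ((junk.drop 1) ++ if junk = [] then [] else [x]).length + rs.length : Nat) : Int) := by
        rw [hjl]; simp; omega
      rw [e1, e2]
      have h := ih (F ++ [x]) ((junk.drop 1) ++ if junk = [] then [] else [x])
      simpa [hb] using h

theorem pvB_eq_filter (netlist : List String) :
    limpaCodigo_alt netlist = netlist.filter (fun s => !pvBad s) := by
  have h := pvBinv netlist [] []
  simp only [List.length_nil, List.nil_append, Nat.add_zero, Nat.zero_add, Nat.cast_zero] at h
  exact h

-- ===== VERDICT (by name: the statement is the Claim_ definition above) =====
theorem limpaCodigo_spec : Claim_equal_limpaCodigo := by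
  intro netlist _
  unfold Spec_limpaCodigo
  rw [pvA_eq_filter, pvB_eq_filter]
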